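-- pv_equiv track=rewrite | github.com/Kumarvels/OpenTrustEval | high_performance_system/core/trust_decision_matrix.py | _aggregate_decisions
-- ===== SOURCE A (Python) =====
-- from typing import Dict, Any, List, Callable
--
-- def _aggregate_decisions(profile_results: Dict[str, Dict]) -> str:
--     """Aggregate decisions from multiple profiles"""
--     decisions = [result['decision'] for result in profile_results.values()]
--
--     if 'REJECTED_CRITICAL_FAILURES' in decisions:
--         return 'REJECTED_CRITICAL_FAILURES'
--     elif 'REJECTED' in decisions:
--         return 'REJECTED'
--     else:
--         return 'APPROVED'
-- ===== SOURCE B (Python) =====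
-- _RANK = {'REJECTED_CRITICAL_FAILURES': 2, 'REJECTED': 1}
-- _NAME = ('APPROVED', 'REJECTED', 'REJECTED_CRITICAL_FAILURES')
--
-- def _aggregate_decisions(profile_results):
--     """Aggregate decisions from multiple profiles (numeric severity, max-reduce)"""
--     worst = max((_RANK.get(result['decision'], 0) for result in profile_results.values()), default=0)
--     return _NAME[worst]
-- ===== Notes on version B (the rewrite author's own statement) =====
-- stated objective: alternative
-- what changed: Maps each decision to a numeric severity rank via a lookup table, reduces with max, and indexes the severity back into a name table, instead of building a decision list and running ordered membership scans.
import Mathlib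
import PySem

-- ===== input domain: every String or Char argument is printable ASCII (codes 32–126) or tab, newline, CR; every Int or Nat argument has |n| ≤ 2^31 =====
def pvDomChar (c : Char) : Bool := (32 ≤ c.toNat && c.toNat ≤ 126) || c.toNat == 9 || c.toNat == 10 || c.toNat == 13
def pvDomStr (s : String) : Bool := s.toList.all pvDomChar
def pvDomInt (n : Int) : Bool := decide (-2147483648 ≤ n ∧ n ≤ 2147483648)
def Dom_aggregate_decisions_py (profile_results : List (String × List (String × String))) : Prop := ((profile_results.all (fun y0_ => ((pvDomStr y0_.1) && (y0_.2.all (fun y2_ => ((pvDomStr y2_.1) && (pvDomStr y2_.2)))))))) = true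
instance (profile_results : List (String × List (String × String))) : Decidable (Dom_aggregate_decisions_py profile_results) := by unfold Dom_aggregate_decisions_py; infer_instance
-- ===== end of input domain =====

-- B replaces A's decision list + ordered membership scans by a numeric severity rank per decision, a max-reduction, and a name table (alternative algorithm, not faster).

-- ===== PORT A =====
-- decisions = [result['decision'] for result in profile_results.values()]; three-way membership chain.
-- result['decision'] ported as Dict.getD with "" default; Pre_ excludes the missing-key inputs, where Python raises KeyError.
def aggregate_decisions_py (profile_results : List (String × List (String × String))) : String :=
  let decisions := profile_results.map (fun p => (PySem.Dict.mk p.2).getD "decision" "")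
  if decisions.contains "REJECTED_CRITICAL_FAILURES" then "REJECTED_CRITICAL_FAILURES"
  else if decisions.contains "REJECTED" then "REJECTED"
  else "APPROVED"

-- ===== PORT B =====
-- _RANK.get(decision, 0): severity rank of one decision string
def pvRank (d : String) : Nat :=
  (PySem.Dict.mk [("REJECTED_CRITICAL_FAILURES", 2), ("REJECTED", 1)]).getD d 0

-- worst = max of ranks over the values (default 0); then index into the name table
def aggregate_decisions_py_alt (profile_results : List (String × List (String × String))) : String :=
  let worst := profile_results.foldl
    (fun (m : Nat) p => max m (pvRank ((PySem.Dict.mk p.2).getD "decision" ""))) 0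
  (["APPROVED", "REJECTED", "REJECTED_CRITICAL_FAILURES"].getD worst "")

-- ===== PRECONDITION & SPEC =====
-- Pre_ excludes exactly the inputs where some profile result lacks the 'decision' key: Python A raises KeyError there.
def Pre_aggregate_decisions_py (profile_results : List (String × List (String × String))) : Prop :=
  ∀ p ∈ profile_results, (PySem.Dict.mk p.2).contains "decision" = true
instance (profile_results : List (String × List (String × String))) : Decidable (Pre_aggregate_decisions_py profile_results) := by unfold Pre_aggregate_decisions_py; infer_instance
def pvWitness_aggregate_decisions_py : (List (String × List (String × String))) :=
  [("p1", [("decision", "APPROVED")]), ("p2", [("decision", "REJECTED")])]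
def Spec_aggregate_decisions_py (profile_results : List (String × List (String × String))) (out : String) : Prop := out = aggregate_decisions_py_alt profile_results
instance (profile_results : List (String × List (String × String))) (out : String) : Decidable (Spec_aggregate_decisions_py profile_results out) := by unfold Spec_aggregate_decisions_py; infer_instance

-- ===== CLAIM (what is proved, stated in full; the proofs are below) =====
def Claim_equal_aggregate_decisions_py : Prop := ∀ (profile_results : List (String × List (String × String))), Dom_aggregate_decisions_py profile_results → Pre_aggregate_decisions_py profile_results → Spec_aggregate_decisions_py profile_results (aggregate_decisions_py profile_results)

-- ===== LEMMAS AND PROOFS =====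

-- the value A's membership chain selects, expressed as the severity of the worst decision in ds
def pvWorstOf (ds : List String) : Nat :=
  if ds.contains "REJECTED_CRITICAL_FAILURES" then 2
  else if ds.contains "REJECTED" then 1 else 0

theorem pvRank_eq (d : String) :
    pvRank d = (if d = "REJECTED_CRITICAL_FAILURES" then 2 else if d = "REJECTED" then 1 else 0) := by
  simp only [pvRank, PySem.Dict.mk, PySem.Dict.getD, PySem.Dict.get?, List.find?]
  by_cases h1 : d = "REJECTED_CRITICAL_FAILURES"
  · subst h1; rfl
  · rw [show ("REJECTED_CRITICAL_FAILURES" == d) = false by rw [beq_eq_false_iff_ne]; exact fun h => h1 h.symm]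
    by_cases h2 : d = "REJECTED"
    · subst h2; rfl
    · rw [show ("REJECTED" == d) = false by rw [beq_eq_false_iff_ne]; exact fun h => h2 h.symm]
      simp [h1, h2]

-- invariant of B's max-fold: the running max equals init ⊔ (severity of the worst decision seen)
theorem pv_fold_max (l : List (String × List (String × String))) (init : Nat) :
    l.foldl (fun (m : Nat) p => max m (pvRank ((PySem.Dict.mk p.2).getD "decision" ""))) init
    = max init (pvWorstOf (l.map (fun p => (PySem.Dict.mk p.2).getD "decision" ""))) := by
  induction l generalizing init with
  | nil => simp [pvWorstOf]
  | cons h t ih =>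
    rw [List.foldl_cons, ih]
    simp only [List.map_cons, pvWorstOf, List.contains_cons, pvRank_eq]
    cases hc1 : (t.map (fun p => (PySem.Dict.mk p.2).getD "decision" "")).contains "REJECTED_CRITICAL_FAILURES" <;>
    cases hc2 : (t.map (fun p => (PySem.Dict.mk p.2).getD "decision" "")).contains "REJECTED" <;>
    by_cases h1 : (PySem.Dict.mk h.2).getD "decision" "" = "REJECTED_CRITICAL_FAILURES" <;>
    by_cases h2 : (PySem.Dict.mk h.2).getD "decision" "" = "REJECTED" <;>
      simp [h1, h2, hc1, hc2] <;> split_ifs <;> simp_all <;> omega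

-- ===== VERDICT (by name: the statement is the Claim_ definition above) =====
theorem aggregate_decisions_py_spec : Claim_equal_aggregate_decisions_py := by
  intro prs _ _
  unfold Spec_aggregate_decisions_py aggregate_decisions_py aggregate_decisions_py_alt
  rw [pv_fold_max]
  simp only [Nat.zero_max, pvWorstOf]
  split_ifs <;> rfl
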